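-- pv_equiv track=rewrite | github.com/kopneva/laba3 | L2N2.py | sum_after_last_positive
-- ===== SOURCE A (Python) =====
-- def sum_after_last_positive(lst):
--     last_positive_index = -1
--     for i in range(len(lst)):
--         if lst[i] > 0:
--             last_positive_index = i
--     if last_positive_index >= 0:
--         return sum(lst[last_positive_index+1:])
--     else:
--         return 0
-- ===== SOURCE B (Python) =====
-- def sum_after_last_positive(lst):
--     # Single forward pass: accumulator resets at each positive element;
--     # 'seen' records whether any positive element occurred.
--     acc = 0
--     seen = False
--     for x in lst:
--         if x > 0:
--             acc = 0
--             seen = True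
--         else:
--             acc += x
--     return acc if seen else 0
-- ===== Notes on version B (the rewrite author's own statement) =====
-- stated objective: simpler
-- what changed: Replaced the index-scan-then-slice-and-sum two-phase structure with a single streaming pass whose accumulator resets at each positive element, tracking a 'seen' flag.
import Mathlib
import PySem

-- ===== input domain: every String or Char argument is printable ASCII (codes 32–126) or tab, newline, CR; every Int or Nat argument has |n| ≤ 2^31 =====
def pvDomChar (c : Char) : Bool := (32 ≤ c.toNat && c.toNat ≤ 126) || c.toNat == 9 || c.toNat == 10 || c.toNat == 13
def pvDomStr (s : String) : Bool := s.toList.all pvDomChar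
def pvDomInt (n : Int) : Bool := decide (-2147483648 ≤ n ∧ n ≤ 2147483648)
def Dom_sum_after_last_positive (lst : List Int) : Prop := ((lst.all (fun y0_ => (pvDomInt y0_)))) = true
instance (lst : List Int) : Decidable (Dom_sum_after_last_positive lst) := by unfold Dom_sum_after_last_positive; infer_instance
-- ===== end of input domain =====

-- B replaces A's last-positive-index scan followed by a slice sum with one
-- streaming pass whose accumulator resets at each positive element (objective: simpler).

-- ===== PORT A =====
def sum_after_last_positive (lst : List Int) : Int :=
  let lastIdx :=
    (PySem.List.pyRange 0 lst.length 1).foldl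
      (fun j i => if PySem.List.pyGetD lst i 0 > 0 then i else j) (-1)
  if lastIdx ≥ 0 then (PySem.List.slice lst (some (lastIdx + 1)) none).sum
  else 0

-- ===== PORT B =====
def sum_after_last_positive_alt (lst : List Int) : Int :=
  let st := lst.foldl
    (fun (st : Int × Bool) x => if x > 0 then (0, true) else (st.1 + x, st.2))
    (0, false)
  if st.2 then st.1 else 0

-- ===== PRECONDITION & SPEC =====
def Spec_sum_after_last_positive (lst : List Int) (out : Int) : Prop := out = sum_after_last_positive_alt lst
instance (lst : List Int) (out : Int) : Decidable (Spec_sum_after_last_positive lst out) := by unfold Spec_sum_after_last_positive; infer_instance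

-- ===== CLAIM (what is proved, stated in full; the proofs are below) =====
def Claim_equal_sum_after_last_positive : Prop := ∀ (lst : List Int), Dom_sum_after_last_positive lst → Spec_sum_after_last_positive lst (sum_after_last_positive lst)

-- ===== LEMMAS AND PROOFS =====

/-- A's index loop, as a standalone definition for the proofs. -/
def pvLastIdx (lst : List Int) : Int :=
  (PySem.List.pyRange 0 lst.length 1).foldl
    (fun j i => if PySem.List.pyGetD lst i 0 > 0 then i else j) (-1)

/-- B's loop state, as a standalone definition for the proofs. -/
def pvState (lst : List Int) : Int × Bool :=
  lst.foldl
    (fun (st : Int × Bool) x => if x > 0 then (0, true) else (st.1 + x, st.2))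
    (0, false)

theorem pvState_append (lst : List Int) (x : Int) :
    pvState (lst ++ [x]) =
      (if x > 0 then (0, true) else ((pvState lst).1 + x, (pvState lst).2)) := by
  simp [pvState, List.foldl_append]

theorem pvLastIdx_append (lst : List Int) (x : Int) :
    pvLastIdx (lst ++ [x]) =
      (if x > 0 then (lst.length : Int) else pvLastIdx lst) := by
  unfold pvLastIdx
  simp only [List.length_append, List.length_cons, List.length_nil]
  push_cast
  rw [PySem.List.pyRange_one_succ_right (a := 0) (b := (lst.length : Int)) (by omega),
      List.foldl_append]
  have hcongr :
      (PySem.List.pyRange 0 (lst.length : Int) 1).foldl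
        (fun j i => if PySem.List.pyGetD (lst ++ [x]) i 0 > 0 then i else j) (-1)
      = (PySem.List.pyRange 0 (lst.length : Int) 1).foldl
        (fun j i => if PySem.List.pyGetD lst i 0 > 0 then i else j) (-1) := by
    apply PySem.List.foldl_congr_mem
    intro acc i hi
    rw [PySem.List.mem_pyRange_one] at hi
    have hi2 : i < ((lst ++ [x]).length : Int) := by simp; omega
    have hget : PySem.List.pyGetD (lst ++ [x]) i 0 = PySem.List.pyGetD lst i 0 := by
      rw [PySem.List.pyGetD_eq_getElem _ _ (by omega) hi2,
          PySem.List.pyGetD_eq_getElem _ _ (by omega) (by omega)]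
      exact List.getElem_append_left (by omega)
    rw [hget]
  rw [hcongr]
  simp only [List.foldl_cons, List.foldl_nil]
  have hgetx : PySem.List.pyGetD (lst ++ [x]) (lst.length : Int) 0 = x := by
    rw [PySem.List.pyGetD_eq_getElem _ _ (by omega) (by simp)]
    simp
  rw [hgetx]

/-- Invariant tying A's last-positive index to B's accumulator state. -/
theorem pv_invariant (lst : List Int) :
    (pvLastIdx lst ≥ 0 ↔ (pvState lst).2 = true) ∧ pvLastIdx lst < lst.length ∧
      ((pvState lst).2 = true →
        0 ≤ pvLastIdx lst ∧
        (pvState lst).1 = (lst.drop (pvLastIdx lst + 1).toNat).sum) := by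
  induction lst using List.reverseRecOn with
  | nil => refine ⟨by decide, by decide, by decide⟩
  | append_singleton lst x ih =>
    obtain ⟨ih1, ih2, ih3⟩ := ih
    rw [pvLastIdx_append, pvState_append]
    have hlen : (((lst ++ [x]).length : Nat) : Int) = (lst.length : Int) + 1 := by
      simp
    by_cases hx : x > 0
    · rw [if_pos hx, if_pos hx]
      refine ⟨by simp, by rw [hlen]; omega, fun _ => ⟨by omega, ?_⟩⟩
      have h1 : ((lst.length : Int) + 1).toNat = lst.length + 1 := by omega
      rw [h1, List.drop_eq_nil_of_le (by simp)]
      rfl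
    · rw [if_neg hx, if_neg hx]
      refine ⟨ih1, by rw [hlen]; omega, fun hs => ?_⟩
      obtain ⟨h0, hsum⟩ := ih3 hs
      refine ⟨h0, ?_⟩
      have hk : (pvLastIdx lst + 1).toNat ≤ lst.length := by omega
      rw [hsum, List.drop_append_of_le_length hk, List.sum_append]
      simp

-- ===== VERDICT (by name: the statement is the Claim_ definition above) =====
theorem sum_after_last_positive_spec : Claim_equal_sum_after_last_positive := by
  intro lst _
  unfold Spec_sum_after_last_positive sum_after_last_positive sum_after_last_positive_alt
  simp only
  obtain ⟨h1, h2, h3⟩ := pv_invariant lst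
  show (if pvLastIdx lst ≥ 0 then (PySem.List.slice lst (some (pvLastIdx lst + 1)) none).sum else 0)
      = (if (pvState lst).2 then (pvState lst).1 else 0)
  by_cases hs : (pvState lst).2 = true
  · obtain ⟨h0, hsum⟩ := h3 hs
    rw [if_pos (h1.mpr hs), if_pos hs, hsum,
        PySem.List.slice_from _ (by omega)]
  · rw [if_neg (fun h => hs (h1.mp h)), if_neg (by simpa using hs)]
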